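-- pv_equiv track=rewrite | github.com/manisaiprasad/Coding-Problems | maxinvertions.py | getMaxInversions
-- ===== SOURCE A (Python) =====
-- def getMaxInversions(arr, k):
--     n = len(arr)
--     if n == 1:
--         return 0
--     for i in range(k):
--         arr.pop()
--
--     n = len(arr)
--     inv_count = 0
--     for i in range(n):
--         for j in range(i + 1, n):
--             if (arr[i] > arr[j]):
--                 inv_count += 1
--
--     return inv_count
-- ===== SOURCE B (Python) =====
-- def getMaxInversions(arr, k):
--     # Count inversions of the prefix left after dropping the last k elements,
--     # by merge sort (O(m log m)). Does not mutate arr (A pops k elements off it).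
--     n = len(arr)
--     m = n - k if n - k > 0 else 0
--
--     def sort_count(xs):
--         if len(xs) <= 1:
--             return xs, 0
--         mid = len(xs) // 2
--         left, cl = sort_count(xs[:mid])
--         right, cr = sort_count(xs[mid:])
--         merged = []
--         inv = 0
--         i = j = 0
--         while i < len(left) and j < len(right):
--             if left[i] <= right[j]:
--                 merged.append(left[i])
--                 i += 1
--             else:
--                 merged.append(right[j])
--                 j += 1
--                 inv += len(left) - i
--         merged.extend(left[i:])
--         merged.extend(right[j:])
--         return merged, cl + cr + inv
--
--     return sort_count(arr[:m])[1]
-- ===== Notes on version B (the rewrite author's own statement) =====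
-- stated objective: faster
-- what changed: Replaces A's nested O(n^2) pair-counting loop (after popping the last k elements in a loop) with merge-sort inversion counting on the untouched prefix arr[:max(n-k,0)], which also leaves the argument list unmutated.
import Mathlib
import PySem

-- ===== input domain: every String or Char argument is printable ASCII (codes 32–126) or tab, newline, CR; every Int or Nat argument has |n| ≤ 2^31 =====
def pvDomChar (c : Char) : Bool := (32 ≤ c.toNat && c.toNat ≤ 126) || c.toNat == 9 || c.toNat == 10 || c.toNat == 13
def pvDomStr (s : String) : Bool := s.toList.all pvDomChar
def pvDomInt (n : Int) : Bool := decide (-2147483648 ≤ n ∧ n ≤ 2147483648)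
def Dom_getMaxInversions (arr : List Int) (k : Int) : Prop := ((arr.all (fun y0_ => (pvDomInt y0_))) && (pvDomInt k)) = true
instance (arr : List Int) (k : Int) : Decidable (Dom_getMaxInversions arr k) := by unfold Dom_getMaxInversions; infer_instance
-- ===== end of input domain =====

-- B replaces A's quadratic double loop with merge-sort inversion counting on the untouched prefix;
-- return-value equivalence only: A pops k elements off its argument list, B does not mutate it.

-- ===== PORT A =====
-- A pops the last k elements in a loop (arr.pop(); dropLast is its effect on a nonempty list —
-- Pre_ excludes the inputs where the list would be empty, i.e. where Python raises IndexError),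
-- then counts pairs i < j with arr[i] > arr[j].
def getMaxInversions (arr : List Int) (k : Int) : Int :=
  let n : Int := arr.length
  if n = 1 then 0
  else
    let arr2 := (PySem.List.pyRange 0 k 1).foldl (fun a _ => a.dropLast) arr
    let n2 : Int := arr2.length
    (PySem.List.pyRange 0 n2 1).foldl (fun inv i =>
      (PySem.List.pyRange (i + 1) n2 1).foldl (fun inv j =>
        if PySem.List.pyGetD arr2 i 0 > PySem.List.pyGetD arr2 j 0 then inv + 1 else inv) inv) 0

-- ===== PORT B =====
-- while-loop of Source B's merge step, fueled so it reduces structurally (fuel = total length;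
-- the fuel-0 branch is unreachable for nonempty input): merges two runs, adding len(left)-i
-- inversions whenever an element of the right run goes before the rest of the left run.
def pvMergeF : Nat → List Int → List Int → List Int × Int
  | 0, _, r => (r, 0)
  | _ + 1, [], r => (r, 0)
  | _ + 1, x :: l, [] => (x :: l, 0)
  | fuel + 1, x :: l, y :: r =>
    if x ≤ y then
      let p := pvMergeF fuel l (y :: r)
      (x :: p.1, p.2)
    else
      let p := pvMergeF fuel (x :: l) r
      (y :: p.1, p.2 + ((x :: l).length : Int))

def pvMerge (l r : List Int) : List Int × Int := pvMergeF (l.length + r.length) l r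

-- sort_count of Source B, fueled by the length (each recursive call strictly shrinks the list):
-- split at the midpoint, recurse, merge counting cross inversions.
def pvSortCountF : Nat → List Int → List Int × Int
  | 0, xs => (xs, 0)
  | fuel + 1, xs =>
    if xs.length ≤ 1 then (xs, 0)
    else
      let mid := xs.length / 2
      let pl := pvSortCountF fuel (xs.take mid)
      let pr := pvSortCountF fuel (xs.drop mid)
      let pm := pvMerge pl.1 pr.1
      (pm.1, pl.2 + pr.2 + pm.2)

def pvSortCount (xs : List Int) : List Int × Int := pvSortCountF xs.length xs

def getMaxInversions_alt (arr : List Int) (k : Int) : Int :=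
  let n : Int := arr.length
  let m : Int := if n - k > 0 then n - k else 0
  (pvSortCount (PySem.List.slice arr none (some m))).2

-- ===== PRECONDITION & SPEC =====
-- Pre_ excludes exactly the inputs where A raises IndexError: pop() from an emptied list,
-- i.e. k > len(arr) with len(arr) ≠ 1 (a one-element list returns 0 before any pop).
def Pre_getMaxInversions (arr : List Int) (k : Int) : Prop :=
  arr.length = 1 ∨ k ≤ (arr.length : Int)
instance (arr : List Int) (k : Int) : Decidable (Pre_getMaxInversions arr k) := by
  unfold Pre_getMaxInversions; infer_instance

def pvWitness_getMaxInversions : List Int × Int := ([3, 1, 2, 5, 4], 1)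

def Spec_getMaxInversions (arr : List Int) (k : Int) (out : Int) : Prop := out = getMaxInversions_alt arr k
instance (arr : List Int) (k : Int) (out : Int) : Decidable (Spec_getMaxInversions arr k out) := by unfold Spec_getMaxInversions; infer_instance

-- ===== CLAIM (what is proved, stated in full; the proofs are below) =====
def Claim_equal_getMaxInversions : Prop := ∀ (arr : List Int) (k : Int), Dom_getMaxInversions arr k → Pre_getMaxInversions arr k → Spec_getMaxInversions arr k (getMaxInversions arr k)

-- ===== LEMMAS AND PROOFS =====

-- number of inversions of a list (reference function both sides are reduced to)
def invCnt : List Int → Int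
  | [] => 0
  | x :: xs => ((xs.filter (fun y => x > y)).length : Int) + invCnt xs

-- cross inversions between two lists
def crossCnt (l r : List Int) : Int :=
  (l.map (fun x => ((r.filter (fun y => x > y)).length : Int))).sum

theorem invCnt_short (xs : List Int) (h : xs.length ≤ 1) : invCnt xs = 0 := by
  match xs, h with
  | [], _ => rfl
  | [x], _ => simp [invCnt]

theorem invCnt_append (l r : List Int) :
    invCnt (l ++ r) = invCnt l + invCnt r + crossCnt l r := by
  induction l with
  | nil => simp [invCnt, crossCnt]
  | cons x l ih =>
    simp only [List.cons_append, invCnt, ih, crossCnt, List.map_cons, List.sum_cons,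
      List.filter_append, List.length_append]
    push_cast
    ring

theorem crossCnt_perm_left {l l' : List Int} (h : l.Perm l') (r : List Int) :
    crossCnt l r = crossCnt l' r := by
  unfold crossCnt
  exact List.Perm.sum_eq (h.map _)

theorem crossCnt_perm_right (l : List Int) {r r' : List Int} (h : r.Perm r') :
    crossCnt l r = crossCnt l r' := by
  unfold crossCnt
  congr 1
  refine List.map_congr_left (fun x _ => ?_)
  simp only [← List.countP_eq_length_filter]
  exact congrArg _ (h.countP_eq _)

theorem crossCnt_cons_right_gt {l : List Int} {y : Int} (h : ∀ z ∈ l, y < z) (r : List Int) :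
    crossCnt l (y :: r) = (l.length : Int) + crossCnt l r := by
  induction l with
  | nil => simp [crossCnt]
  | cons z l ih =>
    have hz : y < z := h z (by simp)
    have ih' := ih (fun w hw => h w (by simp [hw]))
    simp only [crossCnt, List.map_cons, List.sum_cons, List.filter_cons, List.length_cons] at *
    have hd : (decide (z > y)) = true := by simpa using hz
    rw [hd]
    simp only [if_pos, List.length_cons] at *
    push_cast at *
    omega

theorem pvMergeF_perm (fuel : Nat) :
    ∀ l r : List Int, l.length + r.length ≤ fuel → (pvMergeF fuel l r).1.Perm (l ++ r) := by
  induction fuel with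
  | zero =>
    intro l r h
    rcases l with _ | ⟨x, l⟩
    · simp [pvMergeF]
    · simp at h
  | succ fuel ih =>
    intro l r h
    match l, r with
    | [], r => simp [pvMergeF]
    | x :: l, [] => simp [pvMergeF]
    | x :: l, y :: r =>
      by_cases hxy : x ≤ y
      · simp only [pvMergeF, if_pos hxy]
        exact ((ih l (y :: r) (by simp at h ⊢; omega)).cons x)
      · simp only [pvMergeF, if_neg hxy]
        exact ((ih (x :: l) r (by simp at h ⊢; omega)).cons y).trans
          (List.Perm.symm List.perm_middle)

theorem pvMergeF_sorted (fuel : Nat) :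
    ∀ l r : List Int, l.length + r.length ≤ fuel →
      l.Pairwise (· ≤ ·) → r.Pairwise (· ≤ ·) → (pvMergeF fuel l r).1.Pairwise (· ≤ ·) := by
  induction fuel with
  | zero =>
    intro l r h _ hr
    rcases l with _ | ⟨x, l⟩
    · exact hr
    · simp at h
  | succ fuel ih =>
    intro l r h hl hr
    match l, r with
    | [], r => exact hr
    | x :: l, [] => exact hl
    | x :: l, y :: r =>
      by_cases hxy : x ≤ y
      · simp only [pvMergeF, if_pos hxy]
        have hfuel : l.length + (y :: r).length ≤ fuel := by simp at h ⊢; omega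
        refine List.pairwise_cons.2 ⟨?_, ih l (y :: r) hfuel (List.pairwise_cons.1 hl).2 hr⟩
        intro b hb
        rcases List.mem_append.1 ((pvMergeF_perm fuel l (y :: r) hfuel).mem_iff.1 hb) with h1 | h1
        · exact (List.pairwise_cons.1 hl).1 b h1
        · rcases List.mem_cons.1 h1 with h1 | h1
          · omega
          · exact le_trans hxy ((List.pairwise_cons.1 hr).1 b h1)
      · simp only [pvMergeF, if_neg hxy]
        have hfuel : (x :: l).length + r.length ≤ fuel := by simp at h ⊢; omega
        refine List.pairwise_cons.2 ⟨?_, ih (x :: l) r hfuel hl (List.pairwise_cons.1 hr).2⟩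
        intro b hb
        rcases List.mem_append.1 ((pvMergeF_perm fuel (x :: l) r hfuel).mem_iff.1 hb) with h1 | h1
        · rcases List.mem_cons.1 h1 with h1 | h1
          · omega
          · have := (List.pairwise_cons.1 hl).1 b h1; omega
        · exact (List.pairwise_cons.1 hr).1 b h1

theorem pvMergeF_snd (fuel : Nat) :
    ∀ l r : List Int, l.length + r.length ≤ fuel →
      l.Pairwise (· ≤ ·) → r.Pairwise (· ≤ ·) → (pvMergeF fuel l r).2 = crossCnt l r := by
  induction fuel with
  | zero =>
    intro l r h _ _
    rcases l with _ | ⟨x, l⟩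
    · simp [pvMergeF, crossCnt]
    · simp at h
  | succ fuel ih =>
    intro l r h hl hr
    match l, r with
    | [], r => simp [pvMergeF, crossCnt]
    | x :: l, [] => simp [pvMergeF, crossCnt]
    | x :: l, y :: r =>
      by_cases hxy : x ≤ y
      · simp only [pvMergeF, if_pos hxy]
        rw [ih l (y :: r) (by simp at h ⊢; omega) (List.pairwise_cons.1 hl).2 hr]
        have hnil : (y :: r).filter (fun z => decide (x > z)) = [] := by
          refine List.filter_eq_nil_iff.2 (fun z hz => ?_)
          rcases List.mem_cons.1 hz with h1 | h1
          · subst h1; simpa using by omega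
          · have := (List.pairwise_cons.1 hr).1 z h1
            simpa using by omega
        simp [crossCnt, hnil]
      · simp only [pvMergeF, if_neg hxy]
        rw [ih (x :: l) r (by simp at h ⊢; omega) hl (List.pairwise_cons.1 hr).2]
        have hgt : ∀ z ∈ x :: l, y < z := by
          intro z hz
          rcases List.mem_cons.1 hz with h1 | h1
          · omega
          · have := (List.pairwise_cons.1 hl).1 z h1; omega
        rw [crossCnt_cons_right_gt hgt]
        simp only [List.length_cons]
        push_cast
        ring

theorem pvSortCountF_spec (fuel : Nat) :
    ∀ xs : List Int, xs.length ≤ fuel + 1 →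
      (pvSortCountF fuel xs).1.Perm xs ∧ (pvSortCountF fuel xs).1.Pairwise (· ≤ ·) ∧
        (pvSortCountF fuel xs).2 = invCnt xs := by
  induction fuel with
  | zero =>
    intro xs h
    refine ⟨List.Perm.refl _, ?_, (invCnt_short xs h).symm⟩
    match xs, h with
    | [], _ => simp [pvSortCountF]
    | [x], _ => simp [pvSortCountF]
  | succ fuel ih =>
    intro xs h
    by_cases h1 : xs.length ≤ 1
    · refine ⟨by rw [pvSortCountF, if_pos h1], ?_, by rw [pvSortCountF, if_pos h1]; exact (invCnt_short xs h1).symm⟩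
      rw [pvSortCountF, if_pos h1]
      match xs, h1 with
      | [], _ => simp
      | [x], _ => simp
    · simp only [pvSortCountF, if_neg h1, pvMerge]
      have hmid1 : (xs.take (xs.length / 2)).length ≤ fuel + 1 := by simp; omega
      have hmid2 : (xs.drop (xs.length / 2)).length ≤ fuel + 1 := by simp; omega
      obtain ⟨pl1, pl2, pl3⟩ := ih (xs.take (xs.length / 2)) hmid1
      obtain ⟨pr1, pr2, pr3⟩ := ih (xs.drop (xs.length / 2)) hmid2
      have hperm : (pvMergeF ((pvSortCountF fuel (xs.take (xs.length / 2))).1.length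
            + (pvSortCountF fuel (xs.drop (xs.length / 2))).1.length)
          (pvSortCountF fuel (xs.take (xs.length / 2))).1
          (pvSortCountF fuel (xs.drop (xs.length / 2))).1).1.Perm xs := by
        refine (pvMergeF_perm _ _ _ (le_refl _)).trans ?_
        have := pl1.append pr1
        rwa [List.take_append_drop] at this
      refine ⟨hperm, pvMergeF_sorted _ _ _ (le_refl _) pl2 pr2, ?_⟩
      have hcross : crossCnt (pvSortCountF fuel (xs.take (xs.length / 2))).1
          (pvSortCountF fuel (xs.drop (xs.length / 2))).1
          = crossCnt (xs.take (xs.length / 2)) (xs.drop (xs.length / 2)) := by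
        rw [crossCnt_perm_left pl1, crossCnt_perm_right _ pr1]
      have hinv := invCnt_append (xs.take (xs.length / 2)) (xs.drop (xs.length / 2))
      rw [List.take_append_drop] at hinv
      rw [pvMergeF_snd _ _ _ (le_refl _) pl2 pr2, pl3, pr3, hcross, hinv]

theorem pvSortCount_snd (xs : List Int) : (pvSortCount xs).2 = invCnt xs := by
  unfold pvSortCount
  rcases xs with _ | ⟨x, xs⟩
  · rfl
  · exact (pvSortCountF_spec (x :: xs).length (x :: xs) (by simp)).2.2

-- ----- A side -----

theorem foldl_const_fun {α β : Type} (xs : List α) (f : β → β) (init : β) :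
    xs.foldl (fun s _ => f s) init = f^[xs.length] init := by
  induction xs generalizing init with
  | nil => rfl
  | cons x xs ih => simp [List.foldl_cons, ih, Function.iterate_succ_apply]

theorem iter_dropLast (j : Nat) (a : List Int) :
    List.dropLast^[j] a = a.take (a.length - j) := by
  induction j generalizing a with
  | zero => simp
  | succ j ih =>
    rw [Function.iterate_succ_apply, ih]
    simp only [List.dropLast_eq_take, List.take_take, List.length_take]
    congr 1
    omega

theorem pop_loop_eq (arr : List Int) (k : Int) :
    (PySem.List.pyRange 0 k 1).foldl (fun a _ => a.dropLast) arr
      = arr.take (arr.length - k.toNat) := by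
  rw [foldl_const_fun, iter_dropLast]
  congr 1
  simp [PySem.List.length_pyRange_one]

theorem sum_inv (a : List Int) :
    ((List.range a.length).map
      (fun i => (((a.drop (i + 1)).filter (fun y => a.getD i 0 > y)).length : Int))).sum
      = invCnt a := by
  induction a with
  | nil => simp [invCnt]
  | cons x xs ih =>
    rw [List.length_cons, List.range_succ_eq_map]
    simp only [List.map_cons, List.map_map, List.sum_cons]
    rw [invCnt]
    have hhead : ((((x :: xs).drop (0 + 1)).filter (fun y => (x :: xs).getD 0 0 > y)).length : Int)
        = ((xs.filter (fun y => x > y)).length : Int) := by simp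
    have htail : ((List.range xs.length).map
          ((fun i => ((((x :: xs).drop (i + 1)).filter (fun y => (x :: xs).getD i 0 > y)).length : Int))
            ∘ Nat.succ)).sum
        = invCnt xs := by
      rw [← ih]
      refine congrArg _ (List.map_congr_left fun i _ => ?_)
      simp [Function.comp, List.getD_cons_succ]
    rw [hhead, htail]

theorem inner_loop_eq (a : List Int) (i inv : Int) (h0 : 0 ≤ i) :
    (PySem.List.pyRange (i + 1) (a.length : Int) 1).foldl
        (fun inv j => if PySem.List.pyGetD a i 0 > PySem.List.pyGetD a j 0 then inv + 1 else inv)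
        inv
      = inv + (((a.drop (i.toNat + 1)).filter (fun y => PySem.List.pyGetD a i 0 > y)).length : Int) := by
  have h1 : (0 : Int) ≤ i + 1 := by omega
  rw [PySem.List.foldl_pyRange_pyGetD' a 0
        (fun acc v => if PySem.List.pyGetD a i 0 > v then acc + 1 else acc) inv h1]
  have h2 : (i + 1).toNat = i.toNat + 1 := by omega
  rw [h2]
  generalize a.drop (i.toNat + 1) = xs
  induction xs generalizing inv with
  | nil => simp
  | cons z zs ih =>
    simp only [List.foldl_cons, List.filter_cons]
    by_cases hz : PySem.List.pyGetD a i 0 > z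
    · simp only [if_pos hz, decide_eq_true hz, if_true, ih, List.length_cons]
      push_cast
      omega
    · simp only [if_neg hz, decide_eq_false hz, Bool.false_eq_true, if_false, ih]

theorem outer_loop_eq (a : List Int) :
    (PySem.List.pyRange 0 (a.length : Int) 1).foldl
        (fun inv i =>
          (PySem.List.pyRange (i + 1) (a.length : Int) 1).foldl
            (fun inv j =>
              if PySem.List.pyGetD a i 0 > PySem.List.pyGetD a j 0 then inv + 1 else inv)
            inv)
        0
      = invCnt a := by
  rw [PySem.List.foldl_congr_mem _ _
        (fun inv i => inv +
          (((a.drop (i.toNat + 1)).filter (fun y => PySem.List.pyGetD a i 0 > y)).length : Int))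
        0
        (by
          intro acc i hi
          exact inner_loop_eq a i acc (PySem.List.mem_pyRange_one.1 hi).1)]
  rw [PySem.List.foldl_add]
  rw [PySem.List.pyRange_one]
  simp only [List.map_map, zero_add, Int.sub_zero, Int.toNat_natCast]
  rw [← sum_inv a]
  refine congrArg List.sum (List.map_congr_left (fun i hi => ?_))
  have hi' : i < a.length := List.mem_range.1 hi
  simp [Function.comp, PySem.List.pyGetD_natCast, Int.toNat_natCast]

theorem alt_eq_invCnt (arr : List Int) (k : Int) :
    getMaxInversions_alt arr k
      = invCnt (arr.take ((if (arr.length : Int) - k > 0 then (arr.length : Int) - k else 0).toNat)) := by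
  show (pvSortCount (PySem.List.slice arr none
      (some (if (arr.length : Int) - k > 0 then (arr.length : Int) - k else 0)))).2 = _
  have hb : (0 : Int) ≤ if (arr.length : Int) - k > 0 then (arr.length : Int) - k else 0 := by
    split <;> omega
  rw [PySem.List.slice_to arr hb]
  exact pvSortCount_snd _

theorem a_unfold (arr : List Int) (k : Int) (h : ¬ ((arr.length : Int) = 1)) :
    getMaxInversions arr k
      = (PySem.List.pyRange 0
            ((((PySem.List.pyRange 0 k 1).foldl (fun a _ => a.dropLast) arr).length : Int)) 1).foldl
          (fun inv i =>
            (PySem.List.pyRange (i + 1)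
                ((((PySem.List.pyRange 0 k 1).foldl (fun a _ => a.dropLast) arr).length : Int)) 1).foldl
              (fun inv j =>
                if PySem.List.pyGetD ((PySem.List.pyRange 0 k 1).foldl (fun a _ => a.dropLast) arr) i 0
                    > PySem.List.pyGetD ((PySem.List.pyRange 0 k 1).foldl (fun a _ => a.dropLast) arr) j 0
                then inv + 1 else inv)
              inv)
          0 := by
  show (if (arr.length : Int) = 1 then 0 else _) = _
  rw [if_neg h]

-- ===== VERDICT (by name: the statement is the Claim_ definition above) =====
theorem getMaxInversions_spec : Claim_equal_getMaxInversions := by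
  intro arr k _ hpre
  unfold Spec_getMaxInversions
  rw [alt_eq_invCnt]
  by_cases h1 : (arr.length : Int) = 1
  · show (if (arr.length : Int) = 1 then 0 else _) = _
    rw [if_pos h1]
    exact (invCnt_short _ (by simp; omega)).symm
  · rw [a_unfold arr k h1, pop_loop_eq, outer_loop_eq]
    rcases hpre with hpre | hpre
    · exact absurd (by exact_mod_cast hpre) h1
    · have harg : arr.take (arr.length - k.toNat)
          = arr.take (if (arr.length : Int) - k > 0 then (arr.length : Int) - k else 0).toNat := by
        rw [List.take_eq_take_iff]
        by_cases hc : (arr.length : Int) - k > 0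
        · rw [if_pos hc]; omega
        · rw [if_neg hc]; omega
      rw [harg]
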